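-- pv_equiv track=rewrite | github.com/cgalab/format-converter | ORD53/common/iter.py | cyclic_pair_iterator
-- ===== SOURCE A (Python) =====
-- def cyclic_pair_iterator(iterable):
--     """Given a list of at least two elements, return pairs of elements, including (last,first).
--
--     Passing an iterator with fewer than 2 elements is considered an error.
--
--     >>> list(cyclic_pair_iterator(range(0)))
--     Traceback (most recent call last):
--      ...
--     RuntimeError: Iterator empty
--     >>> list(cyclic_pair_iterator(range(1)))
--     Traceback (most recent call last):
--      ...
--     RuntimeError: Iterator too short
--     >>> list(cyclic_pair_iterator(range(2)))
--     [(0, 1), (1, 0)]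
--     >>> list(cyclic_pair_iterator(range(3)))
--     [(0, 1), (1, 2), (2, 0)]
--     >>> list(cyclic_pair_iterator(range(4)))
--     [(0, 1), (1, 2), (2, 3), (3, 0)]
--     """
--     it = iter(iterable)
--     try:
--         first = prev = next(it)
--     except StopIteration:
--         raise RuntimeError("Iterator empty")
--     i = _sentinel = object()
--     for i in it:
--         yield (prev, i)
--         prev = i
--     if i == _sentinel:
--         raise RuntimeError("Iterator too short")
--     yield (prev, first)
-- ===== SOURCE B (Python) =====
-- def cyclic_pair_iterator(iterable):
--     """Yield consecutive pairs of elements cyclically, including (last, first)."""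
--     items = list(iterable)
--     if len(items) == 0:
--         raise RuntimeError("Iterator empty")
--     if len(items) == 1:
--         raise RuntimeError("Iterator too short")
--     yield from zip(items, items[1:] + items[:1])
-- ===== Notes on version B (the rewrite author's own statement) =====
-- stated objective: simpler
-- what changed: Replaces the prev/sentinel single-pass generator with materialize-then-rotate: list the items, check the length up front, and zip the list with its rotation by one.
import Mathlib
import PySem

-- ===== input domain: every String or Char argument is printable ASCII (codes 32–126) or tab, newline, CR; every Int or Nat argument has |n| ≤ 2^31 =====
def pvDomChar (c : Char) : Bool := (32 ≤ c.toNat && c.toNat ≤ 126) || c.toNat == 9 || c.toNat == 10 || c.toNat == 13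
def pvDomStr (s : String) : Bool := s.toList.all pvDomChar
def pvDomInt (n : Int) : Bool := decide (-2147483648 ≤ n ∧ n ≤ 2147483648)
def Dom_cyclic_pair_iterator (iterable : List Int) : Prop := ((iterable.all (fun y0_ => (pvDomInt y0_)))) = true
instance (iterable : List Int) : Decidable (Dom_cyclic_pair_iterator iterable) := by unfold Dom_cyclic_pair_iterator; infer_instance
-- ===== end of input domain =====

-- B replaces A's prev/sentinel single pass by zipping the list with its rotation by one; objective: simpler.
-- ===== PORT A =====
-- A: first = prev = next(it) (raise "Iterator empty" if none); for i in it: yield (prev,i); prev=i;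
-- if the loop never ran raise "Iterator too short"; finally yield (prev, first).
-- The raising inputs (length < 2) are outside Pre_; the port returns [] there.
def cyclic_pair_iterator (iterable : List Int) : List (Int × Int) :=
  match iterable with
  | [] => []  -- RuntimeError "Iterator empty": excluded by Pre_
  | first :: it =>
    -- the for-loop: state = (yielded pairs so far, prev)
    let s := it.foldl (fun (s : List (Int × Int) × Int) i => (s.1 ++ [(s.2, i)], i)) ([], first)
    if it = [] then []  -- i == _sentinel: RuntimeError "Iterator too short", excluded by Pre_
    else s.1 ++ [(s.2, first)]

-- ===== PORT B =====
-- B: zip(items, items[1:] + items[:1]) after the length checks (raising inputs outside Pre_).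
def cyclic_pair_iterator_alt (iterable : List Int) : List (Int × Int) :=
  if iterable.length < 2 then []  -- the two RuntimeErrors, excluded by Pre_
  else iterable.zip (iterable.drop 1 ++ iterable.take 1)

-- ===== PRECONDITION & SPEC =====
-- Pre_ excludes lists of fewer than two elements, on which both A and B raise
-- RuntimeError (the generator yields no value).
def Pre_cyclic_pair_iterator (iterable : List Int) : Prop := 2 ≤ iterable.length
instance (iterable : List Int) : Decidable (Pre_cyclic_pair_iterator iterable) := by unfold Pre_cyclic_pair_iterator; infer_instance
def pvWitness_cyclic_pair_iterator : List Int := [0, 1, 2]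

def Spec_cyclic_pair_iterator (iterable : List Int) (out : List (Int × Int)) : Prop := out = cyclic_pair_iterator_alt iterable
instance (iterable : List Int) (out : List (Int × Int)) : Decidable (Spec_cyclic_pair_iterator iterable out) := by unfold Spec_cyclic_pair_iterator; infer_instance

-- ===== CLAIM (what is proved, stated in full; the proofs are below) =====
def Claim_equal_cyclic_pair_iterator : Prop := ∀ (iterable : List Int), Dom_cyclic_pair_iterator iterable → Pre_cyclic_pair_iterator iterable → Spec_cyclic_pair_iterator iterable (cyclic_pair_iterator iterable)

-- ===== LEMMAS AND PROOFS =====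
-- Loop invariant: emitting pairs from state (acc, prev) and closing with `first`
-- equals acc followed by zipping (prev :: rest) with (rest ++ [first]).
theorem cpi_foldl_zip (rest : List Int) (prev first : Int) (acc : List (Int × Int)) :
    (rest.foldl (fun (s : List (Int × Int) × Int) i => (s.1 ++ [(s.2, i)], i)) (acc, prev)).1
      ++ [((rest.foldl (fun (s : List (Int × Int) × Int) i => (s.1 ++ [(s.2, i)], i)) (acc, prev)).2, first)]
    = acc ++ (prev :: rest).zip (rest ++ [first]) := by
  induction rest generalizing prev acc with
  | nil => simp
  | cons i rs ih =>
    simp only [List.foldl_cons]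
    rw [ih]
    simp

-- ===== VERDICT (by name: the statement is the Claim_ definition above) =====
theorem cyclic_pair_iterator_spec : Claim_equal_cyclic_pair_iterator := by
  intro iterable _ hpre
  unfold Spec_cyclic_pair_iterator cyclic_pair_iterator cyclic_pair_iterator_alt
  match iterable with
  | [] => simp [Pre_cyclic_pair_iterator] at hpre
  | [first] => simp [Pre_cyclic_pair_iterator] at hpre
  | first :: i :: rs =>
    simp only [reduceCtorEq, if_false]
    rw [cpi_foldl_zip (i :: rs) first first []]
    simp
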